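-- pv_equiv track=rewrite | github.com/NodeJSmith/aoc | aoc/day14/puzzle2_brute.py | get_total_load
-- ===== SOURCE A (Python) =====
-- def get_total_load(lines):
--     total_load = 0
--     for i, line in enumerate(lines):
--         load_mult = len(lines) - i
--         num_rocks = sum([1 for char in line if char == "O"])
--         line_load = num_rocks * load_mult
--
--         total_load += line_load
--
--     return total_load
-- ===== SOURCE B (Python) =====
-- def get_total_load(lines):
--     total = 0
--     running = 0
--     for line in lines:
--         running += line.count("O")
--         total += running
--     return total
-- ===== Notes on version B (the rewrite author's own statement) =====
-- stated objective: faster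
-- what changed: Replaces the per-row list-comprehension count and multiplication by (len(lines)-i) with a running prefix sum of str.count rock counts added once per remaining row.
import Mathlib
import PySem

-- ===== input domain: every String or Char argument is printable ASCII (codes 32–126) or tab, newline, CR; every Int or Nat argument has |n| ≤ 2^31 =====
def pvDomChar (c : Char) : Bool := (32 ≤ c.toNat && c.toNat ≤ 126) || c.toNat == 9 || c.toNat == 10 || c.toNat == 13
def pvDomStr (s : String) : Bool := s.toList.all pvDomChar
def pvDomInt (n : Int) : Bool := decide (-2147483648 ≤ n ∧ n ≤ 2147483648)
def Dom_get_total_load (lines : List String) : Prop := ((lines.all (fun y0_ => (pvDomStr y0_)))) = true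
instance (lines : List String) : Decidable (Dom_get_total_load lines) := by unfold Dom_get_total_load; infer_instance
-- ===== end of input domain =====

-- B replaces the per-row weight multiplication with a running prefix sum of rock counts (simpler decomposition).


-- ===== PORT A =====
def get_total_load (lines : List String) : Int :=
  (PySem.List.enumerate lines).foldl
    (fun total_load p =>
      let load_mult : Int := (lines.length : Int) - p.1
      let num_rocks : Int := ((p.2.toList.filter (fun char => char == 'O')).map (fun _ => (1 : Int))).sum
      let line_load := num_rocks * load_mult
      total_load + line_load) 0

-- ===== PORT B =====
def get_total_load_alt (lines : List String) : Int :=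
  (lines.foldl
    (fun (s : Int × Int) line =>
      let running := s.1 + (PySem.Str.count line "O" : Int)
      (running, s.2 + running)) (0, 0)).2

-- ===== PRECONDITION & SPEC =====
def Spec_get_total_load (lines : List String) (out : Int) : Prop := out = get_total_load_alt lines
instance (lines : List String) (out : Int) : Decidable (Spec_get_total_load lines out) := by unfold Spec_get_total_load; infer_instance

-- ===== CLAIM (what is proved, stated in full; the proofs are below) =====
def Claim_equal_get_total_load : Prop := ∀ (lines : List String), Dom_get_total_load lines → Spec_get_total_load lines (get_total_load lines)

-- ===== LEMMAS AND PROOFS =====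

-- per-line count of 'O' rocks, as an Int
def cO (line : String) : Int := (line.toList.count 'O' : Int)

-- recursive form of A's weighted sum: row at index s weighs N - s
def SA (N : Int) : Int → List String → Int
  | _, [] => 0
  | s, x :: xs => cO x * (N - s) + SA N (s + 1) xs

-- recursive form of the total load with relative weights
def B0 : List String → Int
  | [] => 0
  | x :: xs => cO x * ((xs.length : Int) + 1) + B0 xs

-- total count of 'O' rocks
def S0 : List String → Int
  | [] => 0
  | x :: xs => cO x + S0 xs

lemma countO_go (l : List Char) (fuel acc : Nat) (h : l.length ≤ fuel) :
    PySem.Chars.count.go ['O'] fuel l acc = acc + l.count 'O' := by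
  induction fuel generalizing l acc with
  | zero =>
    interval_cases hl : l.length
    · simp [List.length_eq_zero_iff.mp hl, PySem.Chars.count.go]
  | succ n ih =>
    cases l with
    | nil => simp [PySem.Chars.count.go]
    | cons c t =>
      unfold PySem.Chars.count.go
      simp only [List.isPrefixOf, List.length_cons] at *
      by_cases hc : c = 'O'
      · subst hc
        rw [if_pos (by simp)]
        rw [show List.drop (([] : List Char).length + 1) ('O' :: t) = t from rfl]
        rw [ih t (acc + 1) (by omega)]
        simp
        omega
      · rw [if_neg (by simp; exact fun hh => hc hh.symm)]
        rw [ih t acc (by omega)]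
        simp [hc]

lemma strCountO (line : String) : (PySem.Str.count line "O" : Int) = cO line := by
  rw [PySem.Str.count_eq]
  show ((PySem.Chars.count line.toList ['O'] : Nat) : Int) = _
  unfold PySem.Chars.count
  rw [countO_go _ _ _ (le_refl _)]
  simp [cO]

lemma numRocks_eq (line : String) :
    ((line.toList.filter (fun char => char == 'O')).map (fun _ => (1 : Int))).sum = cO line := by
  rw [List.map_const', List.sum_replicate, cO]
  simp [← List.countP_eq_length_filter, List.count_eq_countP]

lemma foldA (N : Int) (xs : List String) : ∀ (s : Int) (acc : Int),
    (PySem.List.enumerate xs s).foldl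
      (fun total_load p =>
        let load_mult : Int := N - p.1
        let num_rocks : Int := ((p.2.toList.filter (fun char => char == 'O')).map (fun _ => (1 : Int))).sum
        let line_load := num_rocks * load_mult
        total_load + line_load) acc = acc + SA N s xs := by
  induction xs with
  | nil => intro s acc; simp [PySem.List.enumerate_nil, SA]
  | cons x xs ih =>
    intro s acc
    rw [PySem.List.enumerate_cons]
    simp only [List.foldl_cons]
    rw [ih (s + 1)]
    simp only [SA, numRocks_eq]
    ring

lemma foldB (xs : List String) : ∀ (r t : Int),
    xs.foldl
      (fun (s : Int × Int) line =>
        let running := s.1 + (PySem.Str.count line "O" : Int)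
        (running, s.2 + running)) (r, t)
      = (r + S0 xs, t + B0 xs + r * (xs.length : Int)) := by
  induction xs with
  | nil => intro r t; simp [S0, B0]
  | cons x xs ih =>
    intro r t
    rw [List.foldl_cons, ih]
    simp only [strCountO, S0, B0, List.length_cons]
    refine Prod.ext ?_ ?_ <;> push_cast <;> ring

lemma sa_eq (xs : List String) : ∀ (s : Int), SA (s + (xs.length : Int)) s xs = B0 xs := by
  induction xs with
  | nil => intro s; simp [SA, B0]
  | cons x xs ih =>
    intro s
    simp only [SA, B0, List.length_cons]
    have h : s + ((xs.length : Int) + 1) = (s + 1) + (xs.length : Int) := by ring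
    push_cast
    rw [show s + ((xs.length : Int) + 1) - s = (xs.length : Int) + 1 by ring]
    have := ih (s + 1)
    rw [show s + 1 + (xs.length : Int) = s + ((xs.length : Int) + 1) by ring] at this
    rw [this]

-- ===== VERDICT (by name: the statement is the Claim_ definition above) =====
theorem get_total_load_spec : Claim_equal_get_total_load := by
  intro lines _
  show get_total_load lines = get_total_load_alt lines
  unfold get_total_load get_total_load_alt
  rw [foldA, foldB]
  have := sa_eq lines 0
  simp only [zero_add] at this
  rw [this]
  ring
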